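-- pv_equiv track=rewrite | github.com/daffapadantya12/Guard-Simple | main.py | apply_policy
-- ===== SOURCE A (Python) =====
-- from typing import Optional, Dict, List, Any
--
-- def apply_policy(guard_results: Dict[str, Dict]) -> str:
--     """Apply the guarding policy to determine final verdict"""
--     verdicts = [result["verdict"] for result in guard_results.values()]
--
--     if "block" in verdicts:
--         return "block"
--     elif "warn" in verdicts:
--         return "warn"
--     else:
--         return "allow"
-- ===== SOURCE B (Python) =====
-- PRIORITY = {"block": 2, "warn": 1}
-- NAMES = {2: "block", 1: "warn"}
--
-- def apply_policy(guard_results):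
--     """Apply the guarding policy to determine final verdict"""
--     best = 0
--     for result in guard_results.values():
--         best = max(best, PRIORITY.get(result["verdict"], 0))
--     return NAMES.get(best, "allow")
-- ===== Notes on version B (the rewrite author's own statement) =====
-- stated objective: idiomatic
-- what changed: Replaces the verdict-list comprehension plus two ordered membership scans with a priority table and a single max-reduction over the results, translating the winning priority back to its name.
import Mathlib
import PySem

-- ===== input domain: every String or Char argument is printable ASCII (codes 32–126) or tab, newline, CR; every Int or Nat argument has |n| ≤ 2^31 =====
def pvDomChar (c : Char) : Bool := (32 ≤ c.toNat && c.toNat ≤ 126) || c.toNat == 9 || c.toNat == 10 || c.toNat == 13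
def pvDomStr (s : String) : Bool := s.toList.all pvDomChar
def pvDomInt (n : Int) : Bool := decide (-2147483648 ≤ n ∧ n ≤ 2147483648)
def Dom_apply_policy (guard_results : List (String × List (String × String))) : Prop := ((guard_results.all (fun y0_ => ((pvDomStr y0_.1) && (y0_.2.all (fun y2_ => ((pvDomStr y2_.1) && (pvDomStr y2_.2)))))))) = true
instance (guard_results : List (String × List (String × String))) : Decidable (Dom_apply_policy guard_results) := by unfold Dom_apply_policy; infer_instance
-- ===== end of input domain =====

-- B replaces the verdict list + ordered membership checks by a priority table and one max-reduction (idiomatic, same cost).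

-- ===== PORT A =====
-- result["verdict"]: Pre_ guarantees the key is present; getD "" is never the KeyError path inside Pre_.
def apply_policy (guard_results : List (String × List (String × String))) : String :=
  let verdicts := (PySem.Dict.ofList guard_results).values.map
      (fun result => ((PySem.Dict.ofList result).get? "verdict").getD "")
  if verdicts.contains "block" then "block"
  else if verdicts.contains "warn" then "warn"
  else "allow"

-- ===== PORT B =====
-- PRIORITY.get(v, 0) and NAMES.get(best, "allow") from Source B
def pvPriorityGet (v : String) : Int :=
  ((PySem.Dict.ofList [("block", (2 : Int)), ("warn", 1)]).get? v).getD 0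

def pvNamesGet (best : Int) : String :=
  ((PySem.Dict.ofList [((2 : Int), "block"), (1, "warn")]).get? best).getD "allow"

def apply_policy_alt (guard_results : List (String × List (String × String))) : String :=
  let best := (PySem.Dict.ofList guard_results).values.foldl
      (fun best result =>
        max best (pvPriorityGet (((PySem.Dict.ofList result).get? "verdict").getD ""))) 0
  pvNamesGet best

-- ===== PRECONDITION & SPEC =====
-- Pre_ excludes exactly the inputs where Python A raises KeyError: an effective result dict without a "verdict" key.
def Pre_apply_policy (guard_results : List (String × List (String × String))) : Prop :=
  ∀ result ∈ (PySem.Dict.ofList guard_results).values,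
    ((PySem.Dict.ofList result).get? "verdict").isSome
instance (guard_results : List (String × List (String × String))) : Decidable (Pre_apply_policy guard_results) := by unfold Pre_apply_policy; infer_instance

def pvWitness_apply_policy : (List (String × List (String × String))) :=
  [("g1", [("verdict", "warn")]), ("g2", [("verdict", "allow")])]

def Spec_apply_policy (guard_results : List (String × List (String × String))) (out : String) : Prop := out = apply_policy_alt guard_results
instance (guard_results : List (String × List (String × String))) (out : String) : Decidable (Spec_apply_policy guard_results out) := by unfold Spec_apply_policy; infer_instance

-- ===== CLAIM (what is proved, stated in full; the proofs are below) =====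
def Claim_equal_apply_policy : Prop := ∀ (guard_results : List (String × List (String × String))), Dom_apply_policy guard_results → Pre_apply_policy guard_results → Spec_apply_policy guard_results (apply_policy guard_results)

-- ===== LEMMAS AND PROOFS =====

theorem pvPriorityGet_eq (v : String) :
    pvPriorityGet v = if v = "block" then 2 else if v = "warn" then 1 else 0 := by
  have h : PySem.Dict.ofList [("block", (2 : Int)), ("warn", 1)]
      = PySem.Dict.mk [("block", 2), ("warn", 1)] := by decide
  rw [pvPriorityGet, h, PySem.Dict.get?_mk_cons, PySem.Dict.get?_mk_cons]
  simp only [PySem.Dict.get?, beq_iff_eq]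
  by_cases h1 : v = "block" <;> by_cases h2 : v = "warn" <;>
    simp [h1, h2, eq_comm, List.find?]

theorem pvNamesGet_eq (m : Int) :
    pvNamesGet m = if m = 2 then "block" else if m = 1 then "warn" else "allow" := by
  have h : PySem.Dict.ofList [((2 : Int), "block"), (1, "warn")]
      = PySem.Dict.mk [(2, "block"), (1, "warn")] := by decide
  rw [pvNamesGet, h, PySem.Dict.get?_mk_cons, PySem.Dict.get?_mk_cons]
  simp only [PySem.Dict.get?, beq_iff_eq]
  by_cases h1 : m = 2 <;> by_cases h2 : m = 1 <;>
    simp [h1, h2, eq_comm, List.find?]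

theorem pvFold_le (vs : List String) (a : Int) :
    a ≤ vs.foldl (fun b v => max b (pvPriorityGet v)) a := by
  induction vs generalizing a with
  | nil => simp
  | cons x xs ih => exact le_trans (le_max_left _ _) (ih _)

theorem pvFold_le_two (vs : List String) (a : Int) (ha : a ≤ 2) :
    vs.foldl (fun b v => max b (pvPriorityGet v)) a ≤ 2 := by
  induction vs generalizing a with
  | nil => simpa
  | cons x xs ih =>
      exact ih _ (by rw [max_le_iff]; refine ⟨ha, ?_⟩; rw [pvPriorityGet_eq]; split_ifs <;> omega)

theorem pvFold_le_one (vs : List String) (a : Int) (ha : a ≤ 1)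
    (hnb : "block" ∉ vs) :
    vs.foldl (fun b v => max b (pvPriorityGet v)) a ≤ 1 := by
  induction vs generalizing a with
  | nil => simpa
  | cons x xs ih =>
      simp only [List.mem_cons, not_or] at hnb
      refine ih _ ?_ hnb.2
      rw [max_le_iff, pvPriorityGet_eq]
      refine ⟨ha, ?_⟩
      split_ifs with hA hB
      · exact absurd hA.symm hnb.1
      · omega
      · omega

theorem pvFold_two (vs : List String) (a : Int) (h0 : 0 ≤ a) (ha : a ≤ 1) :
    (vs.foldl (fun b v => max b (pvPriorityGet v)) a = 2 ↔ "block" ∈ vs) := by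
  induction vs generalizing a with
  | nil => simp; omega
  | cons x xs ih =>
      simp only [List.foldl_cons, List.mem_cons]
      by_cases hx : x = "block"
      · subst hx
        have hacc : max a (pvPriorityGet "block") = 2 := by
          have hp : pvPriorityGet "block" = 2 := by decide
          rw [hp]; exact max_eq_right (by omega)
        rw [hacc]
        have h1 := pvFold_le xs 2
        have h2 := pvFold_le_two xs 2 le_rfl
        constructor
        · intro _; exact Or.inl rfl
        · intro _; omega
      · have hlt : pvPriorityGet x ≤ 1 := by
          rw [pvPriorityGet_eq]; simp [hx]; split_ifs <;> omega
        have hge : 0 ≤ pvPriorityGet x := by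
          rw [pvPriorityGet_eq]; split_ifs <;> omega
        rw [ih _ (by omega) (by omega)]
        simp [show ¬("block" = x) from fun h => hx h.symm]

theorem pvFold_one (vs : List String) (a : Int) (h0 : 0 ≤ a) (ha : a ≤ 1)
    (hnb : "block" ∉ vs) :
    (vs.foldl (fun b v => max b (pvPriorityGet v)) a = 1 ↔ ("warn" ∈ vs ∨ a = 1)) := by
  induction vs generalizing a with
  | nil => simp
  | cons x xs ih =>
      simp only [List.mem_cons, not_or] at hnb
      simp only [List.foldl_cons, List.mem_cons]
      by_cases hx : x = "warn"
      · subst hx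
        have hacc : max a (pvPriorityGet "warn") = 1 := by
          have hp : pvPriorityGet "warn" = 1 := by decide
          rw [hp]; exact max_eq_right ha
        rw [hacc]
        have h1 := pvFold_le xs 1
        have h2 := pvFold_le_one xs 1 le_rfl hnb.2
        constructor
        · intro _; exact Or.inl (Or.inl rfl)
        · intro _; omega
      · have hacc : max a (pvPriorityGet x) = a := by
          rw [pvPriorityGet_eq, if_neg (fun h => hnb.1 h.symm), if_neg hx]
          exact max_eq_left h0
        rw [hacc, ih _ h0 ha hnb.2]
        simp [show ¬("warn" = x) from fun h => hx h.symm]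

-- the two programs agree, stated on the extracted verdict list
theorem pvVerdicts_eq (vs : List String) :
    (if vs.contains "block" then "block"
     else if vs.contains "warn" then "warn" else "allow")
      = pvNamesGet (vs.foldl (fun b v => max b (pvPriorityGet v)) 0) := by
  rw [pvNamesGet_eq]
  have h2 := pvFold_two vs 0 le_rfl (by omega)
  have h1 := pvFold_one vs 0 le_rfl (by omega)
  by_cases hb : "block" ∈ vs
  · simp [hb, h2.mpr hb]
  · by_cases hw : "warn" ∈ vs
    · have := (h1 hb).mpr (Or.inl hw)
      simp [hb, hw, this]
    · have hne2 : vs.foldl (fun b v => max b (pvPriorityGet v)) 0 ≠ 2 := by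
        intro h; exact hb (h2.mp h)
      have hne1 : vs.foldl (fun b v => max b (pvPriorityGet v)) 0 ≠ 1 := by
        intro h
        rcases (h1 hb).mp h with h | h
        · exact hw h
        · omega
      simp [hb, hw, hne2, hne1]

-- ===== VERDICT (by name: the statement is the Claim_ definition above) =====
theorem apply_policy_spec : Claim_equal_apply_policy := by
  intro gr _ _
  unfold Spec_apply_policy apply_policy apply_policy_alt
  have h := pvVerdicts_eq ((PySem.Dict.ofList gr).values.map
    (fun result => ((PySem.Dict.ofList result).get? "verdict").getD ""))
  rw [List.foldl_map] at h
  simpa using h
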